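-- pv_equiv track=rewrite | github.com/bentheiii/CheckMateWriter | boardstate.py | coortransform
-- ===== SOURCE A (Python) =====
-- def coortransform(origin,transform,size=8):
--     #return origin
--     transform %= 4
--     while transform < 0:
--         transform += 4
--     if transform == 1:
--         return size-origin[1]-1, origin[0]
--     if transform == 2:
--         return size-origin[0]-1,size-origin[1]-1
--     if transform == 3:
--         return origin[1],size-origin[0]-1
--     return origin
-- ===== SOURCE B (Python) =====
-- def coortransform(origin, transform, size=8):
--     transform %= 4
--     result = origin
--     for _ in range(transform):
--         result = (size - result[1] - 1, result[0])
--     return result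
-- ===== Notes on version B (the rewrite author's own statement) =====
-- stated objective: simpler
-- what changed: Replaces the three per-case closed-form branches by iterating the single 90-degree rotation step (size - y - 1, x) transform%4 times; for transform%4==0 the original tuple is returned unchanged, as in A.
import Mathlib
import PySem

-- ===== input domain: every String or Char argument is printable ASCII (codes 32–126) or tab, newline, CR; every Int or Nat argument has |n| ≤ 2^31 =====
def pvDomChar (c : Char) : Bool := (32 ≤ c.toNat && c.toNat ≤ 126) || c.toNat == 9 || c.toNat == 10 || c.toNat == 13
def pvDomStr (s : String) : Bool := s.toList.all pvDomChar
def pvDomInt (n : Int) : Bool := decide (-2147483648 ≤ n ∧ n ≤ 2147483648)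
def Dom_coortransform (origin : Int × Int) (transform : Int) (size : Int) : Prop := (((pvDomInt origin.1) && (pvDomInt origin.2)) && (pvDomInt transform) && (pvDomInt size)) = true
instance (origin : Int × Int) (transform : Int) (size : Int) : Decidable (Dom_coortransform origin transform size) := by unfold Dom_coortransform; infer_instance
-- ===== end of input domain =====

-- B iterates one elementary 90° rotation step transform%4 times instead of A's per-case closed forms (objective: simpler).

-- ===== PORT A =====
-- 'while transform < 0: transform += 4' — literal port; measure (-t).toNat decreases
def pvBumpNonneg (t : Int) : Int :=
  if t < 0 then pvBumpNonneg (t + 4) else t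
termination_by (-t).toNat
decreasing_by omega

def coortransform (origin : Int × Int) (transform : Int) (size : Int) : Int × Int :=
  let t := pvBumpNonneg (PySem.Int.mod transform 4)
  if t = 1 then (size - origin.2 - 1, origin.1)
  else if t = 2 then (size - origin.1 - 1, size - origin.2 - 1)
  else if t = 3 then (origin.2, size - origin.1 - 1)
  else origin

-- ===== PORT B =====
-- the 'for _ in range(transform)' loop of Source B
def pvRotSteps (n : Nat) (size : Int) (p : Int × Int) : Int × Int :=
  match n with
  | 0 => p
  | Nat.succ m => pvRotSteps m size (size - p.2 - 1, p.1)

def coortransform_alt (origin : Int × Int) (transform : Int) (size : Int) : Int × Int :=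
  pvRotSteps (PySem.Int.mod transform 4).toNat size origin

-- ===== PRECONDITION & SPEC =====
def Spec_coortransform (origin : Int × Int) (transform : Int) (size : Int) (out : Int × Int) : Prop := out = coortransform_alt origin transform size
instance (origin : Int × Int) (transform : Int) (size : Int) (out : Int × Int) : Decidable (Spec_coortransform origin transform size out) := by unfold Spec_coortransform; infer_instance

-- ===== CLAIM (what is proved, stated in full; the proofs are below) =====
def Claim_equal_coortransform : Prop := ∀ (origin : Int × Int) (transform : Int) (size : Int), Dom_coortransform origin transform size → Spec_coortransform origin transform size (coortransform origin transform size)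

-- ===== LEMMAS AND PROOFS =====
theorem pvBumpNonneg_of_nonneg (t : Int) (h : 0 ≤ t) : pvBumpNonneg t = t := by
  unfold pvBumpNonneg
  simp [show ¬ t < 0 by omega]

theorem pymod4_emod (x : Int) : PySem.Int.mod x 4 = x % 4 :=
  PySem.Int.mod_eq_emod_of_pos (by norm_num)

theorem pymod4_cases (x : Int) :
    PySem.Int.mod x 4 = 0 ∨ PySem.Int.mod x 4 = 1 ∨ PySem.Int.mod x 4 = 2 ∨ PySem.Int.mod x 4 = 3 := by
  rw [pymod4_emod]; omega

theorem pymod4_nonneg (x : Int) : 0 ≤ PySem.Int.mod x 4 := by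
  rw [pymod4_emod]; omega

-- ===== VERDICT (by name: the statement is the Claim_ definition above) =====
theorem coortransform_spec : Claim_equal_coortransform := by
  intro origin transform size _
  unfold Spec_coortransform coortransform coortransform_alt
  rw [pvBumpNonneg_of_nonneg _ (pymod4_nonneg transform)]
  rcases pymod4_cases transform with h | h | h | h <;>
    rw [h] <;> simp [pvRotSteps, show ((0:Int).toNat)=0 from rfl, show ((1:Int).toNat)=1 from rfl, show ((2:Int).toNat)=2 from rfl, show ((3:Int).toNat)=3 from rfl, Prod.ext_iff] <;> omega
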